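-- pv_equiv track=rewrite | github.com/da-in/algorithm-study | Programmers - 문제풀이/인사고과/jiwon.py | solution
-- ===== SOURCE A (Python) =====
-- def solution(scores):
--     answer=1
--     wanho = scores[0]
--     wanho_sum = sum(wanho)
--
--     scores = sorted(scores, key=lambda x:(-x[0],x[1]))
--     x = scores[0][1]
--
--     for score in scores:
--         if score[0]>wanho[0] and score[1]>wanho[1]:
--             return -1
--         if score[1]>=x:
--             x=score[1]
--             if sum(score)>wanho_sum:
--                 answer+=1
--
--     return answer
-- ===== SOURCE B (Python) =====
-- def solution(scores):
--     wanho = scores[0]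
--     wanho_sum = sum(wanho)
--     if any(e[0] > wanho[0] and e[1] > wanho[1] for e in scores):
--         return -1
--     count = sum(1 for e in scores
--                 if sum(e) > wanho_sum
--                 and not any(j[0] > e[0] and j[1] > e[1] for j in scores))
--     return 1 + count
-- ===== Notes on version B (the rewrite author's own statement) =====
-- stated objective: simpler
-- what changed: B drops A's sort, sort key, running-maximum state and early-return loop, and instead counts employees whose score sum beats Wanho's and who are not strictly dominated by any other employee, using direct pairwise domination scans.
import Mathlib
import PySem

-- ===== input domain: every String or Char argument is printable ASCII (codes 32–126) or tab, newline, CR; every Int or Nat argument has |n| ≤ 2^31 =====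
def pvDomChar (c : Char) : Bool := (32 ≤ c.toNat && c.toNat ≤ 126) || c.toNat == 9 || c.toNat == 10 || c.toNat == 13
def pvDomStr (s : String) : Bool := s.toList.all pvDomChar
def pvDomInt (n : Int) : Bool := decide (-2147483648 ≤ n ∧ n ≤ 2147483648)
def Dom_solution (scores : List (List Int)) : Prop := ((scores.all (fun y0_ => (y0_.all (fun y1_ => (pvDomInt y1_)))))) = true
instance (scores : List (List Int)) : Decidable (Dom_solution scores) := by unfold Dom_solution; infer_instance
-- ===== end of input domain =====

-- B replaces A's sort-plus-running-maximum scan by direct pairwise strict-domination tests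
-- (count the non-dominated employees whose sum beats Wanho's); objective: simpler, not faster.

-- ===== PORT A =====
-- e[0] / e[1]; defaults are unreachable under Pre_solution (rows have length ≥ 2, list nonempty)
def g0 (e : List Int) : Int := PySem.List.pyGetD e 0 0
def g1 (e : List Int) : Int := PySem.List.pyGetD e 1 0

-- Python's sort key (-x[0], x[1]) compares tuples lexicographically: ported with the Lex order on Int × Int
def keyA (e : List Int) : Lex (Int × Int) := toLex (-(g0 e), g1 e)

-- the 'for score in scores:' loop, with the early 'return -1'
def loopA (wanho : List Int) (wanhoSum : Int) : List (List Int) → Int → Int → Int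
  | [], _, answer => answer
  | score :: rest, x, answer =>
    if g0 wanho < g0 score ∧ g1 wanho < g1 score then -1
    else if x ≤ g1 score then
      loopA wanho wanhoSum rest (g1 score) (if wanhoSum < score.sum then answer + 1 else answer)
    else loopA wanho wanhoSum rest x answer

def solution (scores : List (List Int)) : Int :=
  match scores with
  | [] => 0   -- unreachable: Python raises IndexError on scores[0]; excluded by Pre_solution
  | wanho :: _ =>
    let wanhoSum := wanho.sum
    let ss := PySem.List.sorted scores keyA false
    let x := g1 (PySem.List.pyGetD ss 0 [])
    loopA wanho wanhoSum ss x 1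

-- ===== PORT B =====
-- any(j[0] > e[0] and j[1] > e[1] for j in l)
def domB (l : List (List Int)) (e : List Int) : Bool :=
  l.any (fun j => decide (g0 e < g0 j) && decide (g1 e < g1 j))

def solution_alt (scores : List (List Int)) : Int :=
  match scores with
  | [] => 0   -- unreachable: Python raises IndexError on scores[0]; excluded by Pre_solution
  | wanho :: _ =>
    let wanhoSum := wanho.sum
    if domB scores wanho then -1
    else 1 + (scores.countP (fun e => decide (wanhoSum < e.sum) && !(domB scores e)) : Int)

-- ===== PRECONDITION & SPEC =====
-- Pre_ excludes exactly the inputs where the Python A raises IndexError: the empty list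
-- (scores[0]) and any row of length < 2 (x[1] in the sort key / loop).
def Pre_solution (scores : List (List Int)) : Prop :=
  scores ≠ [] ∧ ∀ e ∈ scores, 2 ≤ e.length
instance (scores : List (List Int)) : Decidable (Pre_solution scores) := by
  unfold Pre_solution; infer_instance
def pvWitness_solution : List (List Int) := [[2, 2], [1, 4], [3, 2]]

def Spec_solution (scores : List (List Int)) (out : Int) : Prop := out = solution_alt scores
instance (scores : List (List Int)) (out : Int) : Decidable (Spec_solution scores out) := by
  unfold Spec_solution; infer_instance

-- ===== CLAIM (what is proved, stated in full; the proofs are below) =====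
def Claim_equal_solution : Prop := ∀ (scores : List (List Int)), Dom_solution scores → Pre_solution scores → Spec_solution scores (solution scores)

-- ===== LEMMAS AND PROOFS =====

-- domination as a Prop
def DomIn (l : List (List Int)) (e : List Int) : Prop := ∃ j ∈ l, g0 e < g0 j ∧ g1 e < g1 j

lemma domB_iff (l : List (List Int)) (e : List Int) : domB l e = true ↔ DomIn l e := by
  simp [domB, DomIn]

lemma domB_perm {l₁ l₂ : List (List Int)} (h : l₁.Perm l₂) (e : List Int) :
    domB l₁ e = domB l₂ e := by
  apply Bool.eq_iff_iff.2
  rw [domB_iff, domB_iff]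
  exact ⟨fun ⟨j, hj, hd⟩ => ⟨j, h.mem_iff.1 hj, hd⟩,
        fun ⟨j, hj, hd⟩ => ⟨j, h.mem_iff.2 hj, hd⟩⟩

-- if some element strictly dominates wanho, the loop returns -1
lemma loopA_neg (w : List Int) (ws : Int) :
    ∀ (l : List (List Int)) (x a : Int), (∃ s ∈ l, g0 w < g0 s ∧ g1 w < g1 s) →
      loopA w ws l x a = -1 := by
  intro l
  induction l with
  | nil => intro x a h; simp at h
  | cons s rest ih =>
    intro x a h
    rcases h with ⟨t, ht, hd⟩
    rcases List.mem_cons.1 ht with ht | ht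
    · subst ht; simp [loopA, hd]
    · by_cases hs : g0 w < g0 s ∧ g1 w < g1 s
      · simp [loopA, hs]
      · by_cases hx : x ≤ g1 s <;>
          simp [loopA, hs, hx, ih _ _ ⟨t, ht, hd⟩]

def pmax (h : Int) (pre : List (List Int)) : Int := pre.foldl (fun m s => max m (g1 s)) h

lemma pmax_append (h : Int) (pre : List (List Int)) (s : List Int) :
    pmax h (pre ++ [s]) = max (pmax h pre) (g1 s) := by
  simp [pmax]

lemma pmax_le_iff (h c : Int) (pre : List (List Int)) :
    pmax h pre ≤ c ↔ h ≤ c ∧ ∀ p ∈ pre, g1 p ≤ c := by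
  induction pre generalizing h with
  | nil => simp [pmax]
  | cons p t ih =>
    simp only [pmax, List.foldl_cons] at *
    rw [ih]
    constructor
    · rintro ⟨h1, h2⟩
      refine ⟨le_trans (le_max_left _ _) h1, fun q hq => ?_⟩
      rcases List.mem_cons.1 hq with hq | hq
      · subst hq; exact le_trans (le_max_right _ _) h1
      · exact h2 q hq
    · rintro ⟨h1, h2⟩
      exact ⟨max_le h1 (h2 p (by simp)), fun q hq => h2 q (by simp [hq])⟩

-- the sort order of A: key a ≤ key b
def Rle (a b : List Int) : Prop := keyA a ≤ keyA b

lemma Rle_iff (a b : List Int) : Rle a b ↔ g0 b < g0 a ∨ (g0 a = g0 b ∧ g1 a ≤ g1 b) := by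
  unfold Rle keyA
  rw [Prod.Lex.toLex_le_toLex]
  constructor
  · rintro (h | ⟨h1, h2⟩)
    · exact Or.inl (by omega)
    · exact Or.inr ⟨by omega, h2⟩
  · rintro (h | ⟨h1, h2⟩)
    · exact Or.inl (by omega)
    · exact Or.inr ⟨by omega, h2⟩

-- an element passes the running-maximum test iff nothing in the sorted list dominates it
lemma pass_iff (pre rest : List (List Int)) (s : List Int)
    (hp : (pre ++ s :: rest).Pairwise Rle) :
    (pmax (g1 ((pre ++ s :: rest).headD [])) pre ≤ g1 s ↔ ¬ DomIn (pre ++ s :: rest) s) := by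
  have hpre : ∀ p ∈ pre, Rle p s := fun p hp' =>
    (List.pairwise_append.1 hp).2.2 p hp' s (by simp)
  have hrest : ∀ j ∈ rest, Rle s j :=
    (List.pairwise_cons.1 (List.pairwise_append.1 hp).2.1).1
  have hnd_tail : ∀ j ∈ rest, ¬ (g0 s < g0 j ∧ g1 s < g1 j) := by
    intro j hj
    have := (Rle_iff s j).1 (hrest j hj); omega
  have hkey : (∀ p ∈ pre, g1 p ≤ g1 s) ↔ ¬ DomIn (pre ++ s :: rest) s := by
    constructor
    · intro hall hdom
      obtain ⟨j, hj, hd⟩ := hdom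
      rcases List.mem_append.1 hj with hjp | hjc
      · have := hall j hjp; omega
      · rcases List.mem_cons.1 hjc with hje | hjr
        · subst hje; omega
        · exact hnd_tail j hjr hd
    · intro hnd p hp'
      have h1 := (Rle_iff p s).1 (hpre p hp')
      by_contra h2
      exact hnd ⟨p, List.mem_append.2 (Or.inl hp'), by omega⟩
  rw [pmax_le_iff]
  cases pre with
  | nil => simpa using hkey
  | cons p0 pt =>
    rw [← hkey]
    constructor
    · rintro ⟨_, h2⟩; exact h2
    · intro hall
      exact ⟨hall p0 (by simp), hall⟩

-- the main loop characterisation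
lemma loopA_count (ss : List (List Int)) (w : List Int) (ws : Int)
    (hp : ss.Pairwise Rle) (hnw : ∀ s ∈ ss, ¬ (g0 w < g0 s ∧ g1 w < g1 s)) :
    ∀ (l pre : List (List Int)) (x a : Int), ss = pre ++ l → x = pmax (g1 (ss.headD [])) pre →
      loopA w ws l x a
        = a + (l.countP (fun e => decide (ws < e.sum) && !(domB ss e)) : Int) := by
  intro l
  induction l with
  | nil => intro pre x a _ _; simp [loopA]
  | cons s rest ih =>
    intro pre x a hss hx
    have hsmem : s ∈ ss := hss ▸ List.mem_append.2 (Or.inr (by simp))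
    have hpass := pass_iff pre rest s (hss ▸ hp)
    have hhead : (pre ++ s :: rest).headD [] = ss.headD [] := by rw [hss]
    rw [hhead] at hpass
    have hss' : ss = (pre ++ [s]) ++ rest := by simp [hss]
    by_cases hb : x ≤ g1 s
    · have hnotdom : ¬ DomIn ss s := hss ▸ hpass.1 (hx ▸ hb)
      have hdomB : domB ss s = false := by
        rcases Bool.eq_false_or_eq_true (domB ss s) with h | h
        · exact absurd ((domB_iff _ _).1 h) hnotdom
        · exact h
      have hx' : g1 s = pmax (g1 (ss.headD [])) (pre ++ [s]) := by
        rw [pmax_append, ← hx, max_eq_right hb]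
      rw [loopA, if_neg (hnw s hsmem), if_pos hb,
        ih (pre ++ [s]) (g1 s) _ hss' hx']
      rw [List.countP_cons]
      simp only [hdomB, Bool.not_false, Bool.and_true]
      by_cases hsum : ws < s.sum
      · simp [hsum]; ring
      · simp [hsum]
    · have hdom : DomIn ss s := by
        by_contra h
        exact hb (hx ▸ (hss ▸ hpass.2 (hss ▸ h)))
      have hdomB : domB ss s = true := (domB_iff _ _).2 hdom
      have hx' : x = pmax (g1 (ss.headD [])) (pre ++ [s]) := by
        rw [pmax_append, ← hx, max_eq_left (by omega)]
      rw [loopA, if_neg (hnw s hsmem), if_neg hb,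
        ih (pre ++ [s]) x _ hss' hx']
      rw [List.countP_cons]
      simp [hdomB]

-- ===== VERDICT (by name: the statement is the Claim_ definition above) =====
theorem solution_spec : Claim_equal_solution := by
  intro scores _ hpre
  unfold Spec_solution
  match scores with
  | [] => exact absurd rfl hpre.1
  | w :: t =>
    show solution (w :: t) = solution_alt (w :: t)
    have hperm : (PySem.List.sorted (w :: t) keyA false).Perm (w :: t) :=
      PySem.List.sorted_perm _ _ _
    set ss := PySem.List.sorted (w :: t) keyA false with hssdef
    have hp : ss.Pairwise Rle := PySem.List.sorted_pairwise _ _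
    have hne : ss ≠ [] := by
      intro h
      rw [PySem.List.sorted_eq_nil_iff] at h
      exact absurd h (by simp)
    by_cases hw : DomIn (w :: t) w
    · obtain ⟨j, hj, hd⟩ := hw
      have hA : solution (w :: t) = -1 := by
        show loopA w _ ss _ 1 = -1
        exact loopA_neg _ _ _ _ _ ⟨j, hperm.mem_iff.2 hj, hd⟩
      have hB : solution_alt (w :: t) = -1 := by
        show (if domB (w :: t) w then _ else _) = -1
        rw [if_pos ((domB_iff _ _).2 ⟨j, hj, hd⟩)]
      rw [hA, hB]
    · have hnw : ∀ s ∈ ss, ¬ (g0 w < g0 s ∧ g1 w < g1 s) := by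
        intro s hs hc
        exact hw ⟨s, hperm.mem_iff.1 hs, hc⟩
      have hx0 : g1 (PySem.List.pyGetD ss 0 []) = pmax (g1 (ss.headD [])) [] := by
        rw [PySem.List.pyGetD_zero, pmax]
        cases ss with
        | nil => rfl
        | cons a b => rfl
      have hA : solution (w :: t) =
          1 + ((ss.countP (fun e => decide (w.sum < e.sum) && !(domB ss e)) : Nat) : Int) := by
        show loopA w w.sum ss (g1 (PySem.List.pyGetD ss 0 [])) 1 = _
        exact loopA_count ss w w.sum hp hnw ss [] _ 1 rfl hx0
      have hcnt : ss.countP (fun e => decide (w.sum < e.sum) && !(domB ss e))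
          = (w :: t).countP (fun e => decide (w.sum < e.sum) && !(domB (w :: t) e)) := by
        rw [show (fun e => decide (w.sum < e.sum) && !(domB ss e))
              = (fun e => decide (w.sum < e.sum) && !(domB (w :: t) e)) from
            funext (fun e => by rw [domB_perm hperm e])]
        exact hperm.countP_eq _
      have hB : solution_alt (w :: t) =
          1 + (((w :: t).countP (fun e => decide (w.sum < e.sum) && !(domB (w :: t) e)) : Nat) : Int) := by
        show (if domB (w :: t) w then _ else _) = _
        rw [if_neg (fun h => hw ((domB_iff _ _).1 h))]
      rw [hA, hB, hcnt]
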